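-- pv_equiv track=rewrite | github.com/dkdk2007/Dns-project | v1.py | is_domain_in_denylist
-- ===== SOURCE A (Python) =====
-- def is_domain_in_denylist(domain: str, denylist: set) -> bool:
--     """
--     Check if domain matches any entry in denylist.
--     Supports exact match and wildcard patterns (*.example.com)
--     """
--     domain = domain.lower().strip()
--
--     # Exact match
--     if domain in denylist:
--         return True
--
--     # Check wildcard patterns (*.example.com should match sub.example.com)
--     for denylist_entry in denylist:
--         if denylist_entry.startswith("*."):
--             # Remove *. and check if domain ends with the pattern
--             pattern = denylist_entry[2:]  # Remove *.
--             if domain.endswith(pattern) or domain.endswith("." + pattern):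
--                 return True
--         # Check if domain is subdomain of denylist entry
--         elif "." in domain:
--             parts = domain.split(".")
--             for i in range(len(parts)):
--                 parent = ".".join(parts[i:])
--                 if parent in denylist:
--                     return True
--
--     return False
-- ===== SOURCE B (Python) =====
-- def is_domain_in_denylist(domain: str, denylist: set) -> bool:
--     """Staged passes: wildcard scan first, then peel the domain's labels one at a
--     time (left to right) and look each remaining parent suffix up in the denylist —
--     no per-entry parent generation."""
--     domain = domain.lower().strip()
--     if domain in denylist:
--         return True
--     for entry in denylist:
--         if entry.startswith("*."):
--             pattern = entry[2:]
--             if domain.endswith(pattern) or domain.endswith("." + pattern):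
--                 return True
--     rest = domain
--     while "." in rest:
--         rest = rest[rest.find(".") + 1:]
--         if rest in denylist:
--             return True
--     return False
-- ===== Notes on version B (the rewrite author's own statement) =====
-- stated objective: faster
-- what changed: A regenerates every parent suffix of the domain and probes the set inside a loop nested under the entry scan; B splits the work into two staged passes: one wildcard scan over the entries, then a single label-peeling loop over the domain that looks each parent suffix up once.
import Mathlib
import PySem

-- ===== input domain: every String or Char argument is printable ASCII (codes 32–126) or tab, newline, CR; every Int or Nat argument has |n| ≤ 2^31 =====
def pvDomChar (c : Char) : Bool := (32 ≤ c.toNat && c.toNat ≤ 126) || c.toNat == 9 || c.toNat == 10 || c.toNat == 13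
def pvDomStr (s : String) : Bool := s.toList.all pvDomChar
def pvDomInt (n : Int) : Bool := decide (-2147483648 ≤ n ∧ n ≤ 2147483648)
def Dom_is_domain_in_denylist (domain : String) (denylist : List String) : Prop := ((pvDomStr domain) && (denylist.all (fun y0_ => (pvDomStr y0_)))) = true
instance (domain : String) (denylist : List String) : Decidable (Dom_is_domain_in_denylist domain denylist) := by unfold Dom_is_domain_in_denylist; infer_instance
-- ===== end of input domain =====

-- B replaces A's per-entry nested parent-generation loop by two staged passes: one
-- wildcard scan over the entries, then one label-peeling loop over the domain that
-- looks each parent suffix up in the denylist once; same return value everywhere.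

-- ===== PORT A =====
-- Both ports view the Python set as the list of its distinct elements (order does not
-- affect the Boolean result) and work on List Char; entry[2:] on chars is List.drop 2 (exact).
def is_domain_in_denylist (domain : String) (denylist : List String) : Bool :=
  let dl := denylist.map String.toList
  let d := PySem.Chars.strip (PySem.Chars.lower domain.toList)   -- domain.lower().strip()
  if dl.contains d then true                                     -- exact match
  else
    dl.any (fun e =>
      if PySem.Chars.startswith e ['*', '.'] then
        let pattern := e.drop 2
        PySem.Chars.endswith d pattern || PySem.Chars.endswith d ('.' :: pattern)
      else if PySem.Chars.isIn ['.'] d then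
        let parts := PySem.Chars.splitOn d ['.']
        (List.range parts.length).any (fun i =>
          dl.contains (PySem.Chars.join ['.'] (parts.drop i)))
      else false)

-- ===== PORT B =====
-- termination measure for the peel loop (each step drops past the first '.')
theorem pvPeel_dec (rest : List Char) (h : PySem.Chars.isIn ['.'] rest = true) :
    (rest.drop ((PySem.Chars.find rest ['.']).toNat + 1)).length < rest.length := by
  have hinf := (PySem.Chars.isIn_iff_infix _ _).1 h
  have hlen : 1 ≤ rest.length := by simpa using hinf.length_le
  simp only [List.length_drop]; omega

-- the while loop: rest = rest[rest.find(".") + 1:]; rest in denylist — find ≥ 0 here,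
-- so the Python slice is List.drop (exact)
def pvPeel (dl : List (List Char)) (rest : List Char) : Bool :=
  if h : PySem.Chars.isIn ['.'] rest = true then
    let rest' := rest.drop ((PySem.Chars.find rest ['.']).toNat + 1)
    if dl.contains rest' then true else pvPeel dl rest'
  else false
termination_by rest.length
decreasing_by exact pvPeel_dec rest h

-- the first for loop of B: wildcard entries only
def pvWildPass (d : List Char) : List (List Char) → Bool
  | [] => false
  | e :: es =>
    if PySem.Chars.startswith e ['*', '.'] then
      let pattern := e.drop 2
      if PySem.Chars.endswith d pattern || PySem.Chars.endswith d ('.' :: pattern) then true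
      else pvWildPass d es
    else pvWildPass d es

def is_domain_in_denylist_alt (domain : String) (denylist : List String) : Bool :=
  let dl := denylist.map String.toList
  let d := PySem.Chars.strip (PySem.Chars.lower domain.toList)
  if dl.contains d then true
  else if pvWildPass d dl then true
  else pvPeel dl d

-- ===== PRECONDITION & SPEC =====
def Spec_is_domain_in_denylist (domain : String) (denylist : List String) (out : Bool) : Prop := out = is_domain_in_denylist_alt domain denylist
instance (domain : String) (denylist : List String) (out : Bool) : Decidable (Spec_is_domain_in_denylist domain denylist out) := by unfold Spec_is_domain_in_denylist; infer_instance

-- ===== CLAIM (what is proved, stated in full; the proofs are below) =====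
def Claim_equal_is_domain_in_denylist : Prop := ∀ (domain : String) (denylist : List String), Dom_is_domain_in_denylist domain denylist → Spec_is_domain_in_denylist domain denylist (is_domain_in_denylist domain denylist)

-- ===== LEMMAS AND PROOFS =====

-- PySem's fueled splitOn on a one-char separator is Mathlib's List.splitOn.
theorem pv_go_spec (fuel : Nat) (l cur : List Char) (acc : List (List Char)) (h : l.length < fuel) :
    PySem.Chars.splitOn.go ['.'] fuel l cur acc
      = acc.reverse ++ (l.splitOn '.').modifyHead (fun x => cur.reverse ++ x) := by
  induction fuel generalizing l cur acc with
  | zero => omega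
  | succ f ih =>
    cases l with
    | nil =>
      simp [PySem.Chars.splitOn.go, List.splitOn]
    | cons c rest =>
      rw [PySem.Chars.splitOn.go]
      by_cases hp : (['.'] : List Char).isPrefixOf (c :: rest) = true
      · have hc : c = '.' := by
          simp [List.isPrefixOf] at hp; exact hp.symm
        rw [if_pos hp]
        simp only [List.length_cons] at h
        rw [ih _ _ _ (by simpa using Nat.lt_of_succ_lt_succ h)]
        subst hc
        simp [List.splitOn, List.splitOnP_cons]
        rw [show (fun x : List Char => x) = id from rfl, List.modifyHead_id]; rfl
      · have hc : ¬ c = '.' := by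
          simp [List.isPrefixOf] at hp; intro hh; exact hp hh.symm
        rw [if_neg hp]
        simp only [List.length_cons] at h
        rw [ih _ _ _ (Nat.lt_of_succ_lt_succ h)]
        have hne : rest.splitOn '.' ≠ [] := by
          simp [List.splitOn]; exact List.splitOnP_ne_nil _ rest
        simp [List.splitOn, List.splitOnP_cons, hc]
        cases hrest : rest.splitOnP (· == '.') with
        | nil => exact absurd (by simp [List.splitOn, hrest]) hne
        | cons a t => simp

theorem pv_splitOn_eq (l : List Char) :
    PySem.Chars.splitOn l ['.'] = l.splitOn '.' := by
  rw [PySem.Chars.splitOn, pv_go_spec _ _ _ _ (by omega)]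
  simp
  rw [show (fun x : List Char => x) = id from rfl, List.modifyHead_id]
  rfl

theorem pv_splitOnP_append (p e : List Char) :
    List.splitOnP (fun x => x == '.') (p ++ '.' :: e)
      = List.splitOnP (fun x => x == '.') p ++ List.splitOnP (fun x => x == '.') e := by
  induction p with
  | nil => simp [List.splitOnP_cons, List.splitOnP_nil]
  | cons a p ih =>
    by_cases ha : a = '.'
    · subst ha
      simp [List.splitOnP_cons, ih]
    · simp only [List.cons_append, List.splitOnP_cons, beq_iff_eq, ha, if_false, ih]
      cases hps : List.splitOnP (fun x => x == '.') p with
      | nil => exact absurd hps (List.splitOnP_ne_nil _ p)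
      | cons b t => simp

theorem pv_splitOn_append (p e : List Char) :
    (p ++ '.' :: e).splitOn '.' = p.splitOn '.' ++ e.splitOn '.' := by
  simp [List.splitOn, pv_splitOnP_append]

theorem pv_intercalate_cons2 (s x y : List Char) (zs : List (List Char)) :
    s.intercalate (x :: y :: zs) = x ++ s ++ s.intercalate (y :: zs) := by
  simp [List.intercalate]

theorem pv_suffix_intercalate (parts : List (List Char)) (i : Nat)
    (h0 : 0 < i) (h1 : i < parts.length) :
    ('.' :: [('.' : Char)].intercalate (parts.drop i)) <:+ [('.' : Char)].intercalate parts := by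
  induction parts generalizing i with
  | nil => simp at h1
  | cons a parts ih =>
    cases parts with
    | nil => simp at h1; omega
    | cons b rest =>
      rcases Nat.lt_or_ge 1 i with hi | hi
      · have := ih (i - 1) (by omega) (by simp at h1 ⊢; omega)
        have hdrop : (a :: b :: rest).drop i = (b :: rest).drop (i - 1) := by
          cases i with
          | zero => omega
          | succ j => simp
        rw [hdrop, pv_intercalate_cons2]
        exact this.trans (List.suffix_append _ _)
      · have hi1 : i = 1 := by omega
        subst hi1
        rw [pv_intercalate_cons2]
        simp only [List.drop_succ_cons, List.drop_zero]
        exact ⟨a, by simp⟩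

theorem pv_char_suffix (d e : List Char) :
    ('.' :: e) <:+ d ↔
      ∃ i, 0 < i ∧ i < (d.splitOn '.').length ∧
        [('.' : Char)].intercalate ((d.splitOn '.').drop i) = e := by
  constructor
  · rintro ⟨p, rfl⟩
    refine ⟨(p.splitOn '.').length, ?_, ?_, ?_⟩
    · simp [List.splitOn]
      exact List.length_pos_of_ne_nil (List.splitOnP_ne_nil _ p)
    · rw [pv_splitOn_append]
      simp [List.splitOn]
      exact List.length_pos_of_ne_nil (List.splitOnP_ne_nil _ e)
    · rw [pv_splitOn_append, List.drop_append_of_le_length (le_refl _)]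
      simp [List.intercalate_splitOn]
  · rintro ⟨i, h0, h1, rfl⟩
    have := pv_suffix_intercalate (d.splitOn '.') i h0 h1
    rwa [List.intercalate_splitOn] at this

-- A's result, once the exact check has failed, in "endswith" form
theorem pv_any_eq (d : List Char) (dl : List (List Char)) (hmem : d ∉ dl) :
    (dl.any (fun e =>
      if PySem.Chars.startswith e ['*', '.'] then
        PySem.Chars.endswith d (e.drop 2) || PySem.Chars.endswith d ('.' :: e.drop 2)
      else if PySem.Chars.isIn ['.'] d then
        (List.range (PySem.Chars.splitOn d ['.']).length).any (fun i =>
          dl.contains (PySem.Chars.join ['.'] ((PySem.Chars.splitOn d ['.']).drop i)))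
      else false))
    = (dl.any (fun e =>
      if PySem.Chars.startswith e ['*', '.'] then
        PySem.Chars.endswith d (e.drop 2) || PySem.Chars.endswith d ('.' :: e.drop 2)
      else PySem.Chars.endswith d ('.' :: e))) := by
  rw [Bool.eq_iff_iff]
  simp only [List.any_eq_true]
  constructor
  · rintro ⟨e, he, hb⟩
    by_cases hw : PySem.Chars.startswith e ['*', '.'] = true
    · exact ⟨e, he, by rw [if_pos hw] at hb ⊢; exact hb⟩
    · rw [if_neg hw] at hb
      by_cases hdot : PySem.Chars.isIn ['.'] d = true
      swap
      · rw [if_neg hdot] at hb; exact absurd hb (by simp)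
      rw [if_pos hdot] at hb
      simp only [List.any_eq_true, List.mem_range] at hb
      obtain ⟨i, hi, hcont⟩ := hb
      rw [pv_splitOn_eq] at hi hcont
      have hpmem : [('.' : Char)].intercalate ((d.splitOn '.').drop i) ∈ dl := by
        rw [← List.contains_iff_mem]
        simpa [PySem.Chars.join] using hcont
      rcases Nat.eq_zero_or_pos i with h0 | hpos
      · subst h0
        rw [List.drop_zero, List.intercalate_splitOn] at hpmem
        exact absurd hpmem hmem
      · set p := [('.' : Char)].intercalate ((d.splitOn '.').drop i) with hp
        have hsuf : ('.' :: p) <:+ d := (pv_char_suffix d p).2 ⟨i, hpos, hi, rfl⟩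
        refine ⟨p, hpmem, ?_⟩
        by_cases hw2 : PySem.Chars.startswith p ['*', '.'] = true
        · rw [if_pos hw2, Bool.or_eq_true]
          left
          rw [PySem.Chars.endswith_iff]
          exact ((List.drop_suffix 2 p).trans (List.suffix_cons '.' p)).trans hsuf
        · rw [if_neg hw2, PySem.Chars.endswith_iff]
          exact hsuf
  · rintro ⟨e, he, hb⟩
    by_cases hw : PySem.Chars.startswith e ['*', '.'] = true
    · exact ⟨e, he, by rw [if_pos hw] at hb ⊢; exact hb⟩
    · rw [if_neg hw, PySem.Chars.endswith_iff] at hb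
      have hdot : PySem.Chars.isIn ['.'] d = true := by
        rw [PySem.Chars.isIn_iff_infix]
        obtain ⟨p, hp⟩ := hb
        exact ⟨p, e, by simpa using hp⟩
      obtain ⟨i, h0, h1, hjoin⟩ := (pv_char_suffix d e).1 hb
      refine ⟨e, he, ?_⟩
      rw [if_neg hw, if_pos hdot]
      simp only [List.any_eq_true, List.mem_range]
      refine ⟨i, by rw [pv_splitOn_eq]; exact h1, ?_⟩
      rw [pv_splitOn_eq]
      have : PySem.Chars.join ['.'] ((d.splitOn '.').drop i) = e := by
        simpa [PySem.Chars.join] using hjoin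
      rw [this, List.contains_iff_mem]
      exact he

-- the B wildcard pass as a List.any
theorem pvWildPass_eq (d : List Char) (dl : List (List Char)) :
    pvWildPass d dl = dl.any (fun e =>
      if PySem.Chars.startswith e ['*', '.'] then
        PySem.Chars.endswith d (e.drop 2) || PySem.Chars.endswith d ('.' :: e.drop 2)
      else false) := by
  induction dl with
  | nil => rfl
  | cons e es ih =>
    rw [List.any_cons, ← ih]
    by_cases hw : PySem.Chars.startswith e ['*', '.'] = true
    · simp only [pvWildPass, hw, if_true]
      by_cases hm : (PySem.Chars.endswith d (e.drop 2)
          || PySem.Chars.endswith d ('.' :: e.drop 2)) = true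
      · simp [hm]
      · simp only [Bool.not_eq_true] at hm; simp [hm]
    · simp only [Bool.not_eq_true] at hw; simp [pvWildPass, hw]

-- position of the first '.' : rest splits as (dot-free prefix) ++ '.' :: rest.drop (k+1)
theorem pv_find_decomp (rest : List Char) (h : PySem.Chars.isIn ['.'] rest = true) :
    rest.drop (PySem.Chars.find rest ['.']).toNat
      = '.' :: rest.drop ((PySem.Chars.find rest ['.']).toNat + 1) := by
  have hnn : 0 ≤ PySem.Chars.find rest ['.'] :=
    (PySem.Chars.find_nonneg_iff _ _).2 ((PySem.Chars.isIn_iff_infix _ _).1 h)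
  obtain ⟨hpre, -⟩ := PySem.Chars.find_spec hnn
  obtain ⟨t, ht⟩ := hpre
  have hstep : rest.drop ((PySem.Chars.find rest ['.']).toNat + 1)
      = List.drop 1 (rest.drop (PySem.Chars.find rest ['.']).toNat) := by
    rw [List.drop_drop]
  rw [hstep, ← ht]
  simp

-- the peel loop finds exactly the proper dotted suffixes present in dl
theorem pvPeel_iff (dl : List (List Char)) (rest : List Char) :
    pvPeel dl rest = true ↔ ∃ e ∈ dl, ('.' :: e) <:+ rest := by
  suffices H : ∀ n rest, rest.length ≤ n →
      (pvPeel dl rest = true ↔ ∃ e ∈ dl, ('.' :: e) <:+ rest) from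
    H rest.length rest le_rfl
  intro n
  induction n with
  | zero =>
    intro rest hr
    have : rest = [] := List.length_eq_zero_iff.1 (Nat.le_zero.1 hr)
    subst this
    rw [pvPeel, dif_neg (by decide)]
    constructor
    · intro hf; simp at hf
    · rintro ⟨e, -, he⟩
      exact absurd he.length_le (by simp)
  | succ n ih =>
    intro rest hr
    rw [pvPeel]
    by_cases h : PySem.Chars.isIn ['.'] rest = true
    · rw [dif_pos h]
      have hnn : 0 ≤ PySem.Chars.find rest ['.'] :=
        (PySem.Chars.find_nonneg_iff _ _).2 ((PySem.Chars.isIn_iff_infix _ _).1 h)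
      obtain ⟨-, hmin⟩ := PySem.Chars.find_spec hnn
      have hdec := pv_find_decomp rest h
      have hdlen := pvPeel_dec rest h
      set k := (PySem.Chars.find rest ['.']).toNat with hk
      have hsuf' : ('.' :: rest.drop (k + 1)) <:+ rest := by
        rw [← hdec]; exact List.drop_suffix _ _
      have hlt : (rest.drop (k + 1)).length ≤ n := by
        simp only [List.length_drop] at hdlen ⊢; omega
      by_cases hc : dl.contains (rest.drop (k + 1)) = true
      · rw [if_pos hc]
        simp only [true_iff]
        exact ⟨_, List.contains_iff_mem.1 hc, hsuf'⟩
      · rw [if_neg hc, ih _ hlt]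
        constructor
        · rintro ⟨e, he, hs⟩
          exact ⟨e, he, hs.trans (List.drop_suffix _ _)⟩
        · rintro ⟨e, he, hs⟩
          obtain ⟨q, hq⟩ := hs
          have hqpre : (['.'] : List Char) <+: rest.drop q.length := by
            rw [← hq, List.drop_left]; exact ⟨e, rfl⟩
          have hge : k ≤ q.length := by
            by_contra hlt'
            exact hmin q.length (by omega) hqpre
          have hne : e ≠ rest.drop (k + 1) := fun heq =>
            absurd (List.contains_iff_mem.2 (heq ▸ he)) (by simpa using hc)
          have hgt : k + 1 ≤ q.length := by
            rcases Nat.eq_or_lt_of_le hge with heq | hlt'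
            · exfalso
              apply hne
              have h1 : rest.drop q.length = '.' :: e := by rw [← hq, List.drop_left]
              rw [← heq, hdec] at h1
              injection h1 with _ h2
              exact h2.symm
            · omega
          refine ⟨e, he, ?_⟩
          have hdq : ('.' :: e) = (rest.drop (k + 1)).drop (q.length - (k + 1)) := by
            rw [List.drop_drop, show k + 1 + (q.length - (k + 1)) = q.length from by omega,
              ← hq, List.drop_left]
          rw [hdq]
          exact List.drop_suffix _ _
    · rw [dif_neg h]
      constructor
      · intro hf; simp at hf
      · rintro ⟨e, -, hs⟩
        exfalso
        apply h
        rw [PySem.Chars.isIn_iff_infix]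
        obtain ⟨q, hq⟩ := hs
        exact ⟨q, e, by simpa using hq⟩

-- ===== VERDICT (by name: the statement is the Claim_ definition above) =====
theorem is_domain_in_denylist_spec : Claim_equal_is_domain_in_denylist := by
  intro domain denylist _
  unfold Spec_is_domain_in_denylist is_domain_in_denylist is_domain_in_denylist_alt
  by_cases hc : (denylist.map String.toList).contains (PySem.Chars.strip (PySem.Chars.lower domain.toList)) = true
  · rw [if_pos hc, if_pos hc]
  · rw [if_neg hc, if_neg hc]
    set dl := denylist.map String.toList with hdl
    set d := PySem.Chars.strip (PySem.Chars.lower domain.toList) with hd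
    have hmem : d ∉ dl := by simpa using hc
    rw [pv_any_eq d dl hmem]
    by_cases hw : pvWildPass d dl = true
    · rw [if_pos hw]
      rw [pvWildPass_eq] at hw
      simp only [List.any_eq_true] at hw ⊢
      obtain ⟨e, he, hb⟩ := hw
      by_cases hws : PySem.Chars.startswith e ['*', '.'] = true
      · exact ⟨e, he, by rw [if_pos hws]; rw [if_pos hws] at hb; exact hb⟩
      · rw [if_neg hws] at hb; exact absurd hb (by simp)
    · rw [if_neg hw]
      rw [Bool.eq_iff_iff, pvPeel_iff]
      simp only [List.any_eq_true]
      constructor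
      · rintro ⟨e, he, hb⟩
        by_cases hws : PySem.Chars.startswith e ['*', '.'] = true
        · exfalso
          apply hw
          rw [pvWildPass_eq]
          simp only [List.any_eq_true]
          exact ⟨e, he, by rw [if_pos hws]; rw [if_pos hws] at hb; exact hb⟩
        · rw [if_neg hws, PySem.Chars.endswith_iff] at hb
          exact ⟨e, he, hb⟩
      · rintro ⟨e, he, hs⟩
        by_cases hws : PySem.Chars.startswith e ['*', '.'] = true
        · exfalso
          apply hw
          rw [pvWildPass_eq]
          simp only [List.any_eq_true]
          refine ⟨e, he, ?_⟩
          rw [if_pos hws, Bool.or_eq_true]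
          left
          rw [PySem.Chars.endswith_iff]
          exact ((List.drop_suffix 2 e).trans (List.suffix_cons '.' e)).trans hs
        · exact ⟨e, he, by rw [if_neg hws, PySem.Chars.endswith_iff]; exact hs⟩
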